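-- pv_equiv track=rewrite | github.com/Matomo-mikan/Prototype_zero | bst.py | helper
-- ===== SOURCE A (Python) =====
-- def helper(list1, list2):
--     # base case
--     if len(list1) == 0:
--         return None
--     lst = list1[-1]
--     # this will check same value
--     if lst in list2:
--         return lst
--     else:
--         return helper(list1[:-1], list2)
-- ===== SOURCE B (Python) =====
-- def helper(list1, list2):
--     for x in reversed(list1):
--         if x in list2:
--             return x
--     return None
-- ===== Notes on version B (the rewrite author's own statement) =====
-- stated objective: simpler
-- what changed: Replaced the tail recursion that repeatedly slices list1[:-1] by a single iterative loop over reversed(list1) returning the first element found in list2.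
import Mathlib
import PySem

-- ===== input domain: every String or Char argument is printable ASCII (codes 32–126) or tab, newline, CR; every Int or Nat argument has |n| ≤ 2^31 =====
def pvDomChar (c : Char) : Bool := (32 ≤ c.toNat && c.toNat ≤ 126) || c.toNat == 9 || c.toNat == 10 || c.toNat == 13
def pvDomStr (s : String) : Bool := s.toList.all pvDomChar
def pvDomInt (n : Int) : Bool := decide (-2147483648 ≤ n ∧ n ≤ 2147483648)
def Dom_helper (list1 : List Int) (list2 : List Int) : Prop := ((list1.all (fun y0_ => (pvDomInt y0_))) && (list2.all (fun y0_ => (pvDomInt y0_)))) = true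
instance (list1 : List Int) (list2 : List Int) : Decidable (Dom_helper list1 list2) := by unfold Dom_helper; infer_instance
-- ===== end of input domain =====

-- B replaces A's recursion on list1[:-1] slices by a single iterative reverse scan (simpler, no repeated copying).

-- ===== PORT A =====
def helper (list1 : List Int) (list2 : List Int) : Option Int :=
  if _h : list1.length = 0 then none
  else
    match PySem.List.pyGet? list1 (-1) with
    | none => none
    | some lst =>
      if lst ∈ list2 then some lst
      else helper (PySem.List.slice list1 none (some (-1))) list2
termination_by list1.length
decreasing_by
  simp [PySem.List.slice_to_neg_one]
  omega

-- ===== PORT B =====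
-- the 'for x in reversed(list1)' loop
def helperAltGo (list2 : List Int) : List Int → Option Int
  | [] => none
  | x :: xs => if x ∈ list2 then some x else helperAltGo list2 xs

def helper_alt (list1 : List Int) (list2 : List Int) : Option Int :=
  helperAltGo list2 list1.reverse

-- ===== PRECONDITION & SPEC =====
def Spec_helper (list1 : List Int) (list2 : List Int) (out : Option Int) : Prop := out = helper_alt list1 list2
instance (list1 : List Int) (list2 : List Int) (out : Option Int) : Decidable (Spec_helper list1 list2 out) := by unfold Spec_helper; infer_instance

-- ===== CLAIM (what is proved, stated in full; the proofs are below) =====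
def Claim_equal_helper : Prop := ∀ (list1 : List Int) (list2 : List Int), Dom_helper list1 list2 → Spec_helper list1 list2 (helper list1 list2)

-- ===== LEMMAS AND PROOFS =====
theorem helper_eq_alt (list1 list2 : List Int) : helper list1 list2 = helper_alt list1 list2 := by
  induction list1 using List.reverseRecOn with
  | nil => simp [helper, helper_alt, helperAltGo]
  | append_singleton xs x ih =>
    rw [helper]
    simp [PySem.List.pyGet?_neg_one_append_singleton, PySem.List.slice_to_neg_one,
      helper_alt, helperAltGo, ih]

-- ===== VERDICT (by name: the statement is the Claim_ definition above) =====
theorem helper_spec : Claim_equal_helper := by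
  intro list1 list2 _
  exact helper_eq_alt list1 list2
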